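-- pv_equiv track=rewrite | github.com/Ragnarok3s/Bmad-Method-v3 | backend/services/core/api/webhooks.py | _extract_signature_value
-- ===== SOURCE A (Python) =====
-- def _parse_signature_header(signature: str) -> dict[str, str]:
--     parts: dict[str, str] = {}
--     for part in signature.split(","):
--         if "=" not in part:
--             continue
--         key, value = part.split("=", 1)
--         key = key.strip().lower()
--         value = value.strip()
--         if key and value:
--             parts[key] = value
--     return parts
--
-- def _extract_signature_value(signature: str | None) -> str | None:
--     if not signature:
--         return None
--     value = signature.strip()
--     if not value:
--         return None
--     parts = _parse_signature_header(value)
--     for key in ("v1", "signature", "sig"):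
--         candidate = parts.get(key)
--         if candidate:
--             return candidate
--     return value
-- ===== SOURCE B (Python) =====
-- def _extract_signature_value(signature):
--     if not signature:
--         return None
--     value = signature.strip()
--     if not value:
--         return None
--     pieces = value.split(",")
--     for key in ("v1", "signature", "sig"):
--         found = None
--         for part in pieces:
--             if "=" not in part:
--                 continue
--             k, v = part.split("=", 1)
--             if k.strip().lower() == key:
--                 v = v.strip()
--                 if v:
--                     found = v
--         if found:
--             return found
--     return value
-- ===== Notes on version B (the rewrite author's own statement) =====
-- stated objective: simpler
-- what changed: Drops the dict-building helper: for each of the three known keys in priority order, a direct last-wins scan over the comma-split parts finds its value, returning immediately on success.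
import Mathlib
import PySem

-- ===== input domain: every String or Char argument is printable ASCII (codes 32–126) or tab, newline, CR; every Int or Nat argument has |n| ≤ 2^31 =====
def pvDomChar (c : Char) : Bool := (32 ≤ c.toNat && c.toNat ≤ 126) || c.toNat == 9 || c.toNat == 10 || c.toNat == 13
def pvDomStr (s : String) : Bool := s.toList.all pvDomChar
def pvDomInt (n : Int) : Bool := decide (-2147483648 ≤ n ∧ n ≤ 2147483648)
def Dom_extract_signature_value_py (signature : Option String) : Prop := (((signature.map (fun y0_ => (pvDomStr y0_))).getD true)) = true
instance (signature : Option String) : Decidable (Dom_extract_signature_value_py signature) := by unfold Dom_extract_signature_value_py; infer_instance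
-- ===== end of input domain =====

-- B drops A's dict-building helper: per known key, a last-wins scan over the comma-split
-- parts, returning immediately when that key yields a non-empty value (objective: simpler).

-- ===== PORT A =====
-- helper _parse_signature_header: builds the dict of key -> last non-empty stripped value
def parseSigHeaderA (signature : String) : PySem.Dict String String :=
  ((PySem.Str.split? signature ",").getD []).foldl (fun parts part =>
    if PySem.Str.isIn "=" part then
      -- key, value = part.split("=", 1): guarded by '=' in part, the split has 2 pieces
      let kv := (PySem.Str.splitMax? part "=" 1).getD []
      let key := PySem.Str.lower (PySem.Str.strip (kv.getD 0 ""))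
      let value := PySem.Str.strip (kv.getD 1 "")
      if key ≠ "" ∧ value ≠ "" then parts.insert key value else parts
    else parts) PySem.Dict.empty

def extract_signature_value_py (signature : Option String) : Option String :=
  match signature with
  | none => none
  | some s =>
    if s = "" then none
    else
      let value := PySem.Str.strip s
      if value = "" then none
      else
        let parts := parseSigHeaderA value
        -- for key in ("v1","signature","sig"): candidate = parts.get(key); if candidate: return candidate
        match (["v1", "signature", "sig"].foldl (fun acc key =>
          match acc with
          | some c => some c
          | none =>
            match PySem.Dict.get? parts key with
            | some candidate => if candidate = "" then none else some candidate
            | none => none) none : Option String) with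
        | some c => some c
        | none => some value

-- ===== PORT B =====
-- inner loop of B: last part whose key matches, with a non-empty stripped value
def scanKeyB (pieces : List String) (key : String) : Option String :=
  pieces.foldl (fun found part =>
    if PySem.Str.isIn "=" part then
      let kv := (PySem.Str.splitMax? part "=" 1).getD []
      if PySem.Str.lower (PySem.Str.strip (kv.getD 0 "")) = key then
        let v := PySem.Str.strip (kv.getD 1 "")
        if v ≠ "" then some v else found
      else found
    else found) none

def extract_signature_value_py_alt (signature : Option String) : Option String :=
  match signature with
  | none => none
  | some s =>
    if s = "" then none
    else
      let value := PySem.Str.strip s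
      if value = "" then none
      else
        let pieces := (PySem.Str.split? value ",").getD []
        match ["v1", "signature", "sig"].findSome? (scanKeyB pieces) with
        | some v => some v
        | none => some value

-- ===== PRECONDITION & SPEC =====
def Spec_extract_signature_value_py (signature : Option String) (out : Option String) : Prop := out = extract_signature_value_py_alt signature
instance (signature : Option String) (out : Option String) : Decidable (Spec_extract_signature_value_py signature out) := by unfold Spec_extract_signature_value_py; infer_instance

-- ===== CLAIM (what is proved, stated in full; the proofs are below) =====
def Claim_equal_extract_signature_value_py : Prop := ∀ (signature : Option String), Dom_extract_signature_value_py signature → Spec_extract_signature_value_py signature (extract_signature_value_py signature)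

-- ===== LEMMAS AND PROOFS =====

-- the per-part step of A's dict-building fold (definitionally the lambda in parseSigHeaderA)
def stepA (parts : PySem.Dict String String) (part : String) : PySem.Dict String String :=
  if PySem.Str.isIn "=" part then
    let kv := (PySem.Str.splitMax? part "=" 1).getD []
    let key := PySem.Str.lower (PySem.Str.strip (kv.getD 0 ""))
    let value := PySem.Str.strip (kv.getD 1 "")
    if key ≠ "" ∧ value ≠ "" then parts.insert key value else parts
  else parts

-- the per-part step of B's scan (definitionally the lambda in scanKeyB)
def stepB (key : String) (found : Option String) (part : String) : Option String :=
  if PySem.Str.isIn "=" part then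
    let kv := (PySem.Str.splitMax? part "=" 1).getD []
    if PySem.Str.lower (PySem.Str.strip (kv.getD 0 "")) = key then
      let v := PySem.Str.strip (kv.getD 1 "")
      if v ≠ "" then some v else found
    else found
  else found

lemma step_rel (key part : String) (hk : key ≠ "")
    (d : PySem.Dict String String) (acc : Option String) (h : PySem.Dict.get? d key = acc) :
    PySem.Dict.get? (stepA d part) key = stepB key acc part := by
  unfold stepA stepB
  by_cases hin : PySem.Str.isIn "=" part = true
  · simp only [hin, if_true]
    generalize (PySem.Str.splitMax? part "=" 1).getD [] = kv
    generalize PySem.Str.lower (PySem.Str.strip (kv.getD 0 "")) = k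
    generalize PySem.Str.strip (kv.getD 1 "") = v
    by_cases hkk : k = key
    · subst hkk
      by_cases hv : v = ""
      · simp [hv, hk, h]
      · simp [hk, hv, PySem.Dict.get?_insert_self]
    · by_cases hcond : k ≠ "" ∧ v ≠ ""
      · rw [if_pos hcond, if_neg hkk, PySem.Dict.get?_insert, if_neg (fun he => hkk he.symm)]
        exact h
      · rw [if_neg hcond, if_neg hkk]; exact h
  · simp only [eq_false_of_ne_true hin, Bool.false_eq_true, if_false]; exact h

lemma fold_rel (key : String) (hk : key ≠ "") :
    ∀ (pieces : List String) (d : PySem.Dict String String) (acc : Option String),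
    PySem.Dict.get? d key = acc →
    PySem.Dict.get? (pieces.foldl stepA d) key = pieces.foldl (stepB key) acc := by
  intro pieces
  induction pieces with
  | nil => intro d acc h; simpa using h
  | cons part rest ih =>
    intro d acc h
    simp only [List.foldl_cons]
    exact ih _ _ (step_rel key part hk d acc h)

lemma scan_eq_parse (value key : String) (hk : key ≠ "") :
    PySem.Dict.get? (parseSigHeaderA value) key
      = scanKeyB ((PySem.Str.split? value ",").getD []) key := by
  show PySem.Dict.get?
      (((PySem.Str.split? value ",").getD []).foldl stepA PySem.Dict.empty) key
    = ((PySem.Str.split? value ",").getD []).foldl (stepB key) none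
  exact fold_rel key hk _ PySem.Dict.empty none (by simp [PySem.Dict.get?_empty])

set_option maxHeartbeats 2000000 in
lemma foldB_nonempty (key : String) :
    ∀ (pieces : List String) (acc : Option String), (∀ u, acc = some u → u ≠ "") →
    ∀ w, pieces.foldl (stepB key) acc = some w → w ≠ "" := by
  intro pieces
  induction pieces with
  | nil => intro acc hacc w hw; exact hacc w hw
  | cons part rest ih =>
    intro acc hacc
    simp only [List.foldl_cons]
    intro w
    apply ih
    intro u hu
    simp only [stepB] at hu
    by_cases hin : PySem.Str.isIn "=" part = true
    · simp only [hin, if_true] at hu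
      by_cases hkk : PySem.Str.lower (PySem.Str.strip (((PySem.Str.splitMax? part "=" 1).getD []).getD 0 "")) = key
      · simp only [if_pos hkk] at hu
        by_cases hv : PySem.Str.strip (((PySem.Str.splitMax? part "=" 1).getD []).getD 1 "") = ""
        · rw [if_neg (by simpa using hv)] at hu
          exact hacc u hu
        · rw [if_pos hv] at hu
          cases hu; exact hv
      · rw [if_neg hkk] at hu; exact hacc u hu
    · simp only [eq_false_of_ne_true hin, Bool.false_eq_true, if_false] at hu
      exact hacc u hu

lemma scanKeyB_nonempty (pieces : List String) (key w : String)
    (h : scanKeyB pieces key = some w) : w ≠ "" :=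
  foldB_nonempty key pieces none (by simp) w h

-- ===== VERDICT (by name: the statement is the Claim_ definition above) =====
set_option maxHeartbeats 2000000 in
theorem extract_signature_value_py_spec : Claim_equal_extract_signature_value_py := by
  intro signature _
  unfold Spec_extract_signature_value_py extract_signature_value_py extract_signature_value_py_alt
  cases signature with
  | none => rfl
  | some s =>
    by_cases hs : s = ""
    · simp [hs]
    · simp only [if_neg hs]
      by_cases hv : PySem.Str.strip s = ""
      · simp only [if_pos hv]
      · simp only [if_neg hv]
        have h1 := scan_eq_parse (PySem.Str.strip s) "v1" (by decide)
        have h2 := scan_eq_parse (PySem.Str.strip s) "signature" (by decide)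
        have h3 := scan_eq_parse (PySem.Str.strip s) "sig" (by decide)
        simp only [List.foldl_cons, List.foldl_nil, List.findSome?]
        rw [h1, h2, h3]
        cases e1 : scanKeyB ((PySem.Str.split? (PySem.Str.strip s) ",").getD []) "v1" with
        | some w1 => simp [scanKeyB_nonempty _ "v1" w1 e1]
        | none =>
          simp only
          cases e2 : scanKeyB ((PySem.Str.split? (PySem.Str.strip s) ",").getD []) "signature" with
          | some w2 => simp [scanKeyB_nonempty _ "signature" w2 e2]
          | none =>
            simp only
            cases e3 : scanKeyB ((PySem.Str.split? (PySem.Str.strip s) ",").getD []) "sig" with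
            | some w3 => simp [scanKeyB_nonempty _ "sig" w3 e3]
            | none => simp
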